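-- pv_equiv track=rewrite | github.com/jomimc/FoldAsymCode | Src/asym_utils.py | ss_segment
-- ===== SOURCE A (Python) =====
-- def ss_segment(ss, c='S'):
--     idx = []
--     segments = []
--     rest = []
--     for i, s in enumerate(ss):
--         if s==c:
--             idx.append(i)
--         else:
--             if len(idx):
--                 segments.append(idx)
--                 idx = []
--             rest.append(i)
--     if len(idx):
--         segments.append(idx)
--     return segments, rest
-- ===== SOURCE B (Python) =====
-- def ss_segment(ss, c='S'):
--     # two-pointer run scanner: process each maximal run of equal key as a unit
--     segments, rest = [], []
--     n = len(ss)
--     i = 0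
--     while i < n:
--         key = ss[i] == c
--         j = i + 1
--         while j < n and (ss[j] == c) == key:
--             j += 1
--         if key:
--             segments.append(list(range(i, j)))
--         else:
--             rest.extend(range(i, j))
--         i = j
--     return segments, rest
-- ===== Notes on version B (the rewrite author's own statement) =====
-- stated objective: alternative
-- what changed: replaces the per-character accumulator-buffer-with-flush loop by a two-pointer scanner that finds each maximal run of equal key and emits the whole run's index range at once
import Mathlib
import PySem

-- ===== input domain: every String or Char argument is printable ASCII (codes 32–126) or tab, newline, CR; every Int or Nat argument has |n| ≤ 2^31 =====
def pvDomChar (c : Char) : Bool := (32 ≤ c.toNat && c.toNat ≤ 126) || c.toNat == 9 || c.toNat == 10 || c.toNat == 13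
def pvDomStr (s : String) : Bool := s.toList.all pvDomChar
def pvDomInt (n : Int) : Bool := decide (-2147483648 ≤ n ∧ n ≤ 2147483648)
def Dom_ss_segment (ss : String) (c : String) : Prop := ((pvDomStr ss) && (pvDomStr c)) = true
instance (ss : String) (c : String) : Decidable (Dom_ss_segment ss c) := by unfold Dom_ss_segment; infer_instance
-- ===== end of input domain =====

-- B replaces A's per-character buffer-flush loop by a two-pointer maximal-run scanner (alternative decomposition, same cost).


-- ===== PORT A =====
-- A's loop: per-character accumulator `idx` flushed into `segments` on every non-match; final flush.
def ssA_loop (c : String) : List (Int × Char) → List Int → List (List Int) → List Int → List (List Int) × List Int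
  | [], idx, segments, rest => (if idx.length ≠ 0 then segments ++ [idx] else segments, rest)
  | (i, s) :: t, idx, segments, rest =>
    if String.mk [s] == c then ssA_loop c t (idx ++ [i]) segments rest
    else ssA_loop c t [] (if idx.length ≠ 0 then segments ++ [idx] else segments) (rest ++ [i])

def ss_segment (ss : String) (c : String) : List (List Int) × List Int :=
  ssA_loop c (PySem.List.enumerate ss.toList) [] [] []

-- ===== PORT B =====
-- B's scanner: each step consumes one maximal run of equal key ( = the inner `while j < n …` loop) and emits it whole.
def ssB_runs (c : String) : List (Int × Char) → List (List Int) × List Int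
  | [] => ([], [])
  | (i, s) :: t =>
    let k := String.mk [s] == c
    let run := t.takeWhile (fun p => (String.mk [p.2] == c) == k)
    let r := ssB_runs c (t.dropWhile (fun p => (String.mk [p.2] == c) == k))
    if k then ((i :: run.map Prod.fst) :: r.1, r.2) else (r.1, (i :: run.map Prod.fst) ++ r.2)
termination_by l => l.length
decreasing_by exact Nat.lt_succ_of_le (List.length_dropWhile_le _ _)

def ss_segment_alt (ss : String) (c : String) : List (List Int) × List Int :=
  ssB_runs c (PySem.List.enumerate ss.toList)

-- ===== PRECONDITION & SPEC =====
def Spec_ss_segment (ss : String) (c : String) (out : List (List Int) × List Int) : Prop := out = ss_segment_alt ss c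
instance (ss : String) (c : String) (out : List (List Int) × List Int) : Decidable (Spec_ss_segment ss c out) := by unfold Spec_ss_segment; infer_instance

-- ===== CLAIM (what is proved, stated in full; the proofs are below) =====
def Claim_equal_ss_segment : Prop := ∀ (ss : String) (c : String), Dom_ss_segment ss c → Spec_ss_segment ss c (ss_segment ss c)

-- ===== LEMMAS AND PROOFS =====

-- a leading non-key element is simply prepended to B's `rest`
theorem ssB_runs_cons_false (c : String) (j : Int) (u : Char) (t : List (Int × Char))
    (hu : (String.mk [u] == c) = false) :
    ssB_runs c ((j, u) :: t) = ((ssB_runs c t).1, j :: (ssB_runs c t).2) := by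
  match t with
  | [] => rw [ssB_runs]; simp [hu, ssB_runs]
  | (k, v) :: t' =>
    by_cases hv : (String.mk [v] == c) = true
    · rw [ssB_runs]
      simp only [hu]
      have : (fun p : Int × Char => (String.mk [p.2] == c) == false) (k, v) = false := by
        simp [hv]
      simp [hv]
    · rw [ssB_runs, ssB_runs]
      simp only [Bool.not_eq_true] at hv
      simp [hu, hv]

theorem ssA_eq_ssB (c : String) : ∀ (n : Nat) (t : List (Int × Char)), t.length ≤ n →
    ∀ (seg : List (List Int)) (rest : List Int),
      (ssA_loop c t [] seg rest = (seg ++ (ssB_runs c t).1, rest ++ (ssB_runs c t).2)) ∧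
      (∀ idx : List Int, idx ≠ [] →
        ssA_loop c t idx seg rest =
          (seg ++ [idx ++ (t.takeWhile (fun p => String.mk [p.2] == c)).map Prod.fst]
               ++ (ssB_runs c (t.dropWhile (fun p => String.mk [p.2] == c))).1,
           rest ++ (ssB_runs c (t.dropWhile (fun p => String.mk [p.2] == c))).2)) := by
  intro n
  induction n with
  | zero =>
    intro t ht seg rest
    have : t = [] := List.eq_nil_of_length_eq_zero (Nat.le_zero.mp ht)
    subst this
    refine ⟨by simp [ssA_loop, ssB_runs], ?_⟩
    intro idx hidx
    simp [ssA_loop, ssB_runs, List.length_eq_zero_iff, hidx]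
  | succ n ih =>
    intro t ht seg rest
    match t with
    | [] =>
      refine ⟨by simp [ssA_loop, ssB_runs], ?_⟩
      intro idx hidx
      simp [ssA_loop, ssB_runs, List.length_eq_zero_iff, hidx]
    | (i, s) :: t' =>
      have ht' : t'.length ≤ n := by simpa using Nat.le_of_succ_le_succ (by simpa using ht)
      constructor
      · -- part 1: empty pending buffer
        by_cases hs : (String.mk [s] == c) = true
        · have := (ih t' ht' seg rest).2 [i] (by simp)
          rw [ssA_loop]
          simp only [hs]
          rw [show ([] : List Int) ++ [i] = [i] from rfl, this]
          rw [ssB_runs]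
          simp [hs, List.append_assoc]
        · have hsf : (String.mk [s] == c) = false := by simpa using hs
          have hF := ssB_runs_cons_false c i s t' hsf
          have hIH := (ih t' ht' seg (rest ++ [i])).1
          rw [ssA_loop]
          simp [hsf, hIH, hF]
      · -- part 2: nonempty pending buffer idx
        intro idx hidx
        by_cases hs : (String.mk [s] == c) = true
        · have := (ih t' ht' seg rest).2 (idx ++ [i]) (by simp)
          rw [ssA_loop]
          simp only [hs]
          rw [this]
          simp [hs, List.append_assoc]
        · have hsf : (String.mk [s] == c) = false := by simpa using hs
          have hF := ssB_runs_cons_false c i s t' hsf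
          have hIH := (ih t' ht' (seg ++ [idx]) (rest ++ [i])).1
          rw [ssA_loop]
          simp [hsf, hidx, hIH, hF, List.append_assoc]

-- ===== VERDICT (by name: the statement is the Claim_ definition above) =====
theorem ss_segment_spec : Claim_equal_ss_segment := by
  intro ss c _
  unfold Spec_ss_segment ss_segment ss_segment_alt
  have := (ssA_eq_ssB c (PySem.List.enumerate ss.toList).length _ le_rfl [] []).1
  simpa using this
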